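-- pv_equiv track=rewrite | github.com/MraDonkey/rethinking_prompting | dataset.py | parse_best_method
-- ===== SOURCE A (Python) =====
-- def parse_best_method(s):
--     start_str = "most suitable method is "
--     start_index = s.find(start_str)
--     if start_index == -1:
--         return ""
--     start_index += len(start_str)
--     end_index = start_index
--     while end_index < len(s) and s[end_index] not in ".,!?;:\n":
--         end_index += 1
--     return s[start_index:end_index].strip()
-- ===== SOURCE B (Python) =====
-- def parse_best_method(s):
--     _, sep, tail = s.partition("most suitable method is ")
--     if not sep:
--         return ""
--     kept = []
--     for ch in tail:
--         if ch in ".,!?;:\n":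
--             break
--         kept.append(ch)
--     return "".join(kept).strip()
-- ===== Notes on version B (the rewrite author's own statement) =====
-- stated objective: simpler
-- what changed: Replaces the find/index-arithmetic while-loop and slice of the original string by str.partition plus a for-loop that accumulates tail characters until the first terminator.
import Mathlib
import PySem

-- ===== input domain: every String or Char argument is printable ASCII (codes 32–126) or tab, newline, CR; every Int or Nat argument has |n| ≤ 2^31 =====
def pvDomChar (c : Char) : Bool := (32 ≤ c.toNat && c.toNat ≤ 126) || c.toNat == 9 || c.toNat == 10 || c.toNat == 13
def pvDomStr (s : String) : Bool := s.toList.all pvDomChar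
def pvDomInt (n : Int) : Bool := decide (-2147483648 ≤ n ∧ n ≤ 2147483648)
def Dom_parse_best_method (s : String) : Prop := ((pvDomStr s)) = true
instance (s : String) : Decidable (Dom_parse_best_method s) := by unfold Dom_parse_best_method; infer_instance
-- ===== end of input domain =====

-- B replaces A's index-arithmetic scan (find, manual while over positions, slice of s)
-- by str.partition plus an accumulate-until-terminator loop over the tail (objective: simpler).

def pvTerms : List Char := ['.', ',', '!', '?', ';', ':', '\n']

-- ===== PORT A =====
-- the while loop: advance end_index while in range and the char is not a terminator
def pvScanA (l : List Char) (i : Nat) : Nat :=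
  if h : i < l.length then
    if l[i] ∈ pvTerms then i else pvScanA l (i + 1)
  else i
termination_by l.length - i

def parse_best_method (s : String) : String :=
  let start_str := "most suitable method is "
  let start_index := PySem.Str.find s start_str
  if start_index = -1 then ""
  else
    let start_index := start_index + PySem.Str.len start_str
    let end_index := pvScanA s.toList start_index.toNat
    PySem.Str.strip (PySem.Str.slice s (some start_index) (some (end_index : Int)))

-- ===== PORT B =====
-- the for-loop with break: collect chars of the tail until a terminator
def pvCollectB (acc : List Char) : List Char → List Char
  | [] => acc
  | ch :: rest => if ch ∈ pvTerms then acc else pvCollectB (acc ++ [ch]) rest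

def parse_best_method_alt (s : String) : String :=
  let marker := "most suitable method is "
  -- s.partition(marker): sep is empty iff the marker does not occur
  let i := PySem.Str.find s marker
  if i = -1 then ""
  else
    let tail := PySem.Str.slice s (some (i + PySem.Str.len marker)) none
    PySem.Str.strip (String.ofList (pvCollectB [] tail.toList))

-- ===== PRECONDITION & SPEC =====
def Spec_parse_best_method (s : String) (out : String) : Prop := out = parse_best_method_alt s
instance (s : String) (out : String) : Decidable (Spec_parse_best_method s out) := by unfold Spec_parse_best_method; infer_instance

-- ===== CLAIM (what is proved, stated in full; the proofs are below) =====
def Claim_equal_parse_best_method : Prop := ∀ (s : String), Dom_parse_best_method s → Spec_parse_best_method s (parse_best_method s)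

-- ===== LEMMAS AND PROOFS =====

lemma pvCollectB_eq (l acc : List Char) :
    pvCollectB acc l = acc ++ l.takeWhile (fun c => !decide (c ∈ pvTerms)) := by
  induction l generalizing acc with
  | nil => simp [pvCollectB]
  | cons ch rest ih =>
    simp only [pvCollectB, List.takeWhile_cons]
    by_cases h : ch ∈ pvTerms <;> simp [h, ih]

lemma pvScanA_eq (l : List Char) (i : Nat) :
    pvScanA l i = i + ((l.drop i).takeWhile (fun c => !decide (c ∈ pvTerms))).length := by
  induction i using (pvScanA.induct l) with
  | case1 i h hmem =>
    rw [pvScanA, dif_pos h, if_pos hmem]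
    rw [List.drop_eq_getElem_cons h, List.takeWhile_cons]
    simp [hmem]
  | case2 i h hmem ih =>
    rw [pvScanA, dif_pos h, if_neg hmem]
    rw [List.drop_eq_getElem_cons h, List.takeWhile_cons]
    simp only [hmem, decide_false, Bool.not_false, if_true, List.length_cons, ih]
    omega
  | case3 i h =>
    rw [pvScanA, dif_neg h]
    rw [List.drop_eq_nil_of_le (by omega)]
    simp

lemma takeWhile_take (p : Char → Bool) (l : List Char) :
    l.take (l.takeWhile p).length = l.takeWhile p := by
  induction l with
  | nil => rfl
  | cons a t ih =>
    by_cases h : p a <;> simp [h, ih]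

-- ===== VERDICT (by name: the statement is the Claim_ definition above) =====
theorem parse_best_method_spec : Claim_equal_parse_best_method := by
  intro s _
  unfold Spec_parse_best_method parse_best_method parse_best_method_alt
  simp only []
  split_ifs with hf
  · rfl
  · -- marker found: both results are strip of the same character list
    have hnn : 0 ≤ PySem.Str.find s "most suitable method is " := by
      have h1 : -1 ≤ PySem.Chars.find s.toList "most suitable method is ".toList :=
        PySem.Chars.neg_one_le_find _ _
      have h2 : PySem.Str.find s "most suitable method is " =
          PySem.Chars.find s.toList "most suitable method is ".toList := by
        simp [PySem.Str.find_eq]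
      rw [h2] at hf ⊢
      omega
    refine congrArg PySem.Str.strip ?_
    apply String.toList_inj.mp
    have h24 : PySem.Str.len "most suitable method is " = 24 := by decide
    rw [h24]
    obtain ⟨k, hk⟩ : ∃ k : Nat, PySem.Str.find s "most suitable method is " + 24 = (k : Int) :=
      ⟨(PySem.Str.find s "most suitable method is " + 24).toNat, by omega⟩
    rw [hk]
    have hkNat : ((k : Int)).toNat = k := by omega
    rw [hkNat]
    rw [pvScanA_eq]
    simp only [PySem.Str.toList_slice, PySem.Chars.slice_eq_listSlice, String.toList_ofList]
    rw [pvCollectB_eq]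
    push_cast
    rw [PySem.List.slice_natCast_add, PySem.List.slice_from_natCast]
    rw [takeWhile_take]
    simp
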